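-- pv_equiv track=rewrite | github.com/strangedove/loft | loft/data_utils.py | fix_conversation_turn_order
-- ===== SOURCE A (Python) =====
-- ROLE_MAPPINGS = {
--     "human": "user",
--     "gpt": "assistant",
--     "system": "system",
--     "user": "user",
--     "assistant": "assistant",
-- }
--
-- DEFAULT_TURN_ORDER_FILLER = "Let's begin."
--
-- def fix_conversation_turn_order(
--     messages: list[dict[str, str]],
--     filler_message: str = DEFAULT_TURN_ORDER_FILLER,
-- ) -> list[dict[str, str]]:
--     """
--     Fix conversation turn order to ensure strict system/user/assistant alternation.
--
--     This function handles models with strict turn order requirements (e.g., Llama) by: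
--     1. Adding a filler user message if conversation starts with assistant (after optional system)
--     2. Merging consecutive messages from the same role into one
--     3. Dropping trailing user messages so conversations end with assistant
--
--     Args:
--         messages: List of message dicts with 'role' and 'content' keys.
--         filler_message: Message to insert when a user turn is missing at the start.
--
--     Returns:
--         Fixed list of messages with proper turn order.
--
--     Example:
--         >>> messages = [
--         ...     {"role": "assistant", "content": "Hello!"},
--         ...     {"role": "user", "content": "Hi"},
--         ...     {"role": "user", "content": "How are you?"},
--         ...     {"role": "assistant", "content": "I'm good!"},
--         ...     {"role": "user", "content": "Great"},
--         ... ]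
--         >>> fix_conversation_turn_order(messages)
--         [
--             {"role": "user", "content": "Let's begin."},
--             {"role": "assistant", "content": "Hello!"},
--             {"role": "user", "content": "Hi\n\nHow are you?"},
--             {"role": "assistant", "content": "I'm good!"},
--         ]
--     """
--     if not messages:
--         return messages
--
--     result = []
--
--     # Step 1: Extract system message if present at the start
--     system_message = None
--     start_idx = 0
--     if messages[0].get("role") == "system":
--         system_message = messages[0]
--         start_idx = 1
--
--     # Check if we need to add a filler user message
--     # (conversation starts with assistant after optional system)
--     if start_idx < len(messages):
--         first_non_system = messages[start_idx]
--         first_role = first_non_system.get("role", "").lower()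
--         first_role = ROLE_MAPPINGS.get(first_role, first_role)
--
--         if first_role == "assistant":
--             # Add system message first if present
--             if system_message:
--                 result.append(system_message)
--             # Add filler user message
--             result.append({"role": "user", "content": filler_message})
--             # Continue from assistant message
--         elif system_message:
--             result.append(system_message)
--     elif system_message:
--         result.append(system_message)
--
--     # Step 2: Process remaining messages, merging consecutive same-role messages
--     for msg in messages[start_idx:]:
--         role = msg.get("role", "").lower()
--         role = ROLE_MAPPINGS.get(role, role)
--         content = msg.get("content", "")
--
--         if not result:
--             result.append({"role": role, "content": content})
--         elif result[-1]["role"] == role: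
--             # Merge with previous message (same role)
--             result[-1]["content"] = result[-1]["content"] + "\n\n" + content
--         else:
--             result.append({"role": role, "content": content})
--
--     # Step 3: Drop trailing user messages (conversation should end with assistant)
--     while result and result[-1].get("role") == "user":
--         result.pop()
--
--     # If we removed everything except system, return empty
--     if len(result) <= 1 and result and result[0].get("role") == "system":
--         return []
--
--     return result
-- ===== SOURCE B (Python) =====
-- from itertools import groupby
--
-- ROLE_MAPPINGS = {
--     "human": "user",
--     "gpt": "assistant",
--     "system": "system",
--     "user": "user",
--     "assistant": "assistant",
-- }
--
-- DEFAULT_TURN_ORDER_FILLER = "Let's begin."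
--
--
-- def _norm_role(msg):
--     r = msg.get("role", "").lower()
--     return ROLE_MAPPINGS.get(r, r)
--
--
-- def fix_conversation_turn_order(
--     messages,
--     filler_message=DEFAULT_TURN_ORDER_FILLER,
-- ):
--     """Normalize roles up front, merge runs with groupby, then assemble."""
--     if not messages:
--         return messages
--
--     system = None
--     rest = messages
--     if messages[0].get("role") == "system":
--         system = messages[0]
--         rest = messages[1:]
--
--     norm = [(_norm_role(m), m.get("content", "")) for m in rest]
--     merged = [(r, "\n\n".join(c for _, c in grp))
--               for r, grp in groupby(norm, key=lambda p: p[0])]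
--
--     needs_filler = bool(merged) and merged[0][0] == "assistant"
--
--     # a leading run of system-role messages folds into the system dict itself
--     if system is not None and merged and merged[0][0] == "system":
--         system = dict(system)
--         system["content"] = system["content"] + "\n\n" + merged[0][1]
--         merged = merged[1:]
--
--     head = []
--     if system is not None:
--         head.append(system)
--     if needs_filler:
--         head.append({"role": "user", "content": filler_message})
--
--     result = head + [{"role": r, "content": c} for r, c in merged]
--
--     while result and result[-1].get("role") == "user":
--         result.pop()
--
--     if len(result) <= 1 and result and result[0].get("role") == "system":
--         return []
--     return result
-- ===== Notes on version B (the rewrite author's own statement) =====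
-- stated objective: alternative
-- what changed: B normalizes every role up front, merges consecutive same-role messages with an itertools.groupby pass (joining contents with '\n\n'), folds a leading system-role run into a copy of the system dict, and then assembles system/filler/body, instead of A's single stateful loop that appends or mutates result[-1] in place; B also does not mutate its argument.
import Mathlib
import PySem

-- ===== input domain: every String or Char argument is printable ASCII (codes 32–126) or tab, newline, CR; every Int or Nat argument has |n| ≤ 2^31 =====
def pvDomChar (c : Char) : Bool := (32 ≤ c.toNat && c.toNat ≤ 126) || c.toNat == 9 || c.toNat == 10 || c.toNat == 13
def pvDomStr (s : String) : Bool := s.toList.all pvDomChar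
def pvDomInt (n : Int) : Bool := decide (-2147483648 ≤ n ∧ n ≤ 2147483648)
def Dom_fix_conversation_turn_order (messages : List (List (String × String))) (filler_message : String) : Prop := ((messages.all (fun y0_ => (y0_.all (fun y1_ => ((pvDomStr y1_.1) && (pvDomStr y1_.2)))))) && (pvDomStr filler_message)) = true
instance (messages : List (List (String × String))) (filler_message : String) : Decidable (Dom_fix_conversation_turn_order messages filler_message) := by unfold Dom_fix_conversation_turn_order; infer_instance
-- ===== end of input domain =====

-- B re-implements A by normalizing roles up front and merging equal-role runs with a groupby-style
-- pass instead of A's stateful append-or-mutate-last loop (objective: alternative decomposition).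
-- Equivalence is about the RETURN value only: A mutates the leading system dict in place when it
-- merges into it; B builds a fresh dict there and never mutates its argument.

-- shared role/dict helpers (both Pythons share ROLE_MAPPINGS and the same .get/.lower idioms)
def pvRoleMap (r : String) : String :=
  if r = "human" then "user"
  else if r = "gpt" then "assistant"
  else if r = "system" then "system"
  else if r = "user" then "user"
  else if r = "assistant" then "assistant"
  else r

-- msg.get("role", "").lower() then ROLE_MAPPINGS.get(role, role)
def pvNormRole (m : List (String × String)) : String :=
  pvRoleMap (PySem.Str.lower ((List.lookup "role" m).getD ""))

-- msg.get("content", ""); A reads result[-1]["content"] with [] (KeyError when absent):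
-- that sole raising input shape is excluded by Pre_, so the total getD form is exact on Pre_.
def pvContent (m : List (String × String)) : String :=
  (List.lookup "content" m).getD ""

def pvMk (r c : String) : List (String × String) := [("role", r), ("content", c)]

-- d["content"] = v : overwrite the first "content" entry in place, append if absent
def pvSetContent : List (String × String) → String → List (String × String)
  | [], v => [("content", v)]
  | (k, x) :: t, v => if k = "content" then (k, v) :: t else (k, x) :: pvSetContent t v

-- ===== PORT A =====
-- Step-2 loop of A: append, or merge into result[-1] when the roles agree.
def pvALoop (res : List (List (String × String))) : List (List (String × String)) → List (List (String × String))
  | [] => res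
  | m :: t =>
    let role := pvNormRole m
    let content := pvContent m
    match res.getLast? with
    | none => pvALoop [pvMk role content] t
    | some last =>
      if List.lookup "role" last = some role then
        pvALoop (res.dropLast ++ [pvSetContent last (pvContent last ++ "\n\n" ++ content)]) t
      else
        pvALoop (res ++ [pvMk role content]) t

-- Step-3 loop of A: while result and result[-1].get("role") == "user": result.pop()
def pvAPop (res : List (List (String × String))) : List (List (String × String)) :=
  match h : res.getLast? with
  | some last =>
    if List.lookup "role" last = some "user" then pvAPop res.dropLast else res
  | none => res
termination_by res.length
decreasing_by
  have hne : res ≠ [] := by rintro rfl; simp at h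
  have := List.length_pos_iff.mpr hne
  simp [List.length_dropLast]; omega

def fix_conversation_turn_order (messages : List (List (String × String))) (filler_message : String) : List (List (String × String)) :=
  match messages with
  | [] => messages
  | first :: restAll =>
    -- Step 1: extract a leading system message; start_idx as the split first/restAll
    let systemMessage : Option (List (String × String)) :=
      if List.lookup "role" first = some "system" then some first else none
    let rest : List (List (String × String)) :=
      if List.lookup "role" first = some "system" then restAll else first :: restAll
    -- filler decision on the first non-system message
    let result : List (List (String × String)) :=
      match rest with
      | m :: _ =>
        let firstRole := pvNormRole m
        if firstRole = "assistant" then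
          (match systemMessage with | some s => [s] | none => []) ++ [pvMk "user" filler_message]
        else
          match systemMessage with | some s => [s] | none => []
      | [] => match systemMessage with | some s => [s] | none => []
    let result := pvALoop result rest
    let result := pvAPop result
    if result.length ≤ 1 ∧ result ≠ [] ∧ List.lookup "role" (result.headD []) = some "system" then
      []
    else result

-- ===== PORT B =====
-- groupby(norm, key=fst) fused with "\n\n".join of the group contents
def pvBGroup : String → String → List (String × String) → List (String × String)
  | r, acc, [] => [(r, acc)]
  | r, acc, (r', c') :: t =>
    if r' = r then pvBGroup r (acc ++ "\n\n" ++ c') t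
    else (r, acc) :: pvBGroup r' c' t

def pvBMerge : List (String × String) → List (String × String)
  | [] => []
  | (r, c) :: t => pvBGroup r c t

-- while result and result[-1].get("role") == "user": result.pop()  (B's defensive tail strip)
def pvBPop (res : List (List (String × String))) : List (List (String × String)) :=
  match h : res.getLast? with
  | some last =>
    if List.lookup "role" last = some "user" then pvBPop res.dropLast else res
  | none => res
termination_by res.length
decreasing_by
  have hne : res ≠ [] := by rintro rfl; simp at h
  have := List.length_pos_iff.mpr hne
  simp [List.length_dropLast]; omega

def fix_conversation_turn_order_alt (messages : List (List (String × String))) (filler_message : String) : List (List (String × String)) :=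
  match messages with
  | [] => messages
  | first :: restAll =>
    let system0 : Option (List (String × String)) :=
      if List.lookup "role" first = some "system" then some first else none
    let rest : List (List (String × String)) :=
      if List.lookup "role" first = some "system" then restAll else first :: restAll
    let norm := rest.map (fun m => (pvNormRole m, pvContent m))
    let merged := pvBMerge norm
    let needsFiller : Bool := match merged with | (r, _) :: _ => r = "assistant" | [] => false
    -- a leading run of system-role messages folds into the system dict itself
    let folded : Option (List (String × String)) × List (String × String) :=
      match system0, merged with
      | some s, (r, c) :: t =>
        if r = "system" then (some (pvSetContent s (pvContent s ++ "\n\n" ++ c)), t)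
        else (some s, (r, c) :: t)
      | s0, mg => (s0, mg)
    let head : List (List (String × String)) :=
      (match folded.1 with | some s => [s] | none => []) ++
        (if needsFiller then [pvMk "user" filler_message] else [])
    let result := head ++ folded.2.map (fun p => pvMk p.1 p.2)
    let result := pvBPop result
    if result.length ≤ 1 ∧ result ≠ [] ∧ List.lookup "role" (result.headD []) = some "system" then
      []
    else result

-- ===== PRECONDITION & SPEC =====
-- Pre_ excludes (a) messages carrying a duplicated key, which no Python dict input can represent
-- under the association-list model, and (b) the one raising shape: a leading system dict without a
-- "content" key followed by a message of normalized role "system" — there BOTH A and B raise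
-- KeyError('content') when merging into the system dict.
def Pre_fix_conversation_turn_order (messages : List (List (String × String))) (filler_message : String) : Prop :=
  (∀ m ∈ messages, (m.map Prod.fst).Nodup) ∧
  ¬ (2 ≤ messages.length ∧
     List.lookup "role" (messages.headD []) = some "system" ∧
     List.lookup "content" (messages.headD []) = none ∧
     pvNormRole ((messages.drop 1).headD []) = "system")
instance (messages : List (List (String × String))) (filler_message : String) : Decidable (Pre_fix_conversation_turn_order messages filler_message) := by unfold Pre_fix_conversation_turn_order; infer_instance

def pvWitness_fix_conversation_turn_order : (List (List (String × String))) × String :=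
  ([[("role", "system"), ("content", "sys")],
    [("role", "gpt"), ("content", "hello")],
    [("role", "user"), ("content", "hi")],
    [("role", "user"), ("content", "again")],
    [("role", "assistant"), ("content", "ok")]], "Let's begin.")

def Spec_fix_conversation_turn_order (messages : List (List (String × String))) (filler_message : String) (out : List (List (String × String))) : Prop := out = fix_conversation_turn_order_alt messages filler_message
instance (messages : List (List (String × String))) (filler_message : String) (out : List (List (String × String))) : Decidable (Spec_fix_conversation_turn_order messages filler_message out) := by unfold Spec_fix_conversation_turn_order; infer_instance

-- ===== CLAIM (what is proved, stated in full; the proofs are below) =====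
def Claim_equal_fix_conversation_turn_order : Prop := ∀ (messages : List (List (String × String))) (filler_message : String), Dom_fix_conversation_turn_order messages filler_message → Pre_fix_conversation_turn_order messages filler_message → Spec_fix_conversation_turn_order messages filler_message (fix_conversation_turn_order messages filler_message)

-- ===== LEMMAS AND PROOFS =====

theorem pv_lookup_cons (a k b : String) (es : List (String × String)) :
    List.lookup a ((k, b) :: es) = if k = a then some b else List.lookup a es := by
  by_cases h : k = a
  · simp [List.lookup, h]
  · have hb : (a == k) = false := beq_false_of_ne (Ne.symm h)
    simp [List.lookup, h, hb]

theorem pv_lookup_role_setContent (d : List (String × String)) (v : String) :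
    List.lookup "role" (pvSetContent d v) = List.lookup "role" d := by
  induction d with
  | nil => simp [pvSetContent]
  | cons p t ih =>
    obtain ⟨k, x⟩ := p
    by_cases h : k = "content" <;> simp [pvSetContent, h, pv_lookup_cons, ih]

theorem pv_lookup_content_setContent (d : List (String × String)) (v : String) :
    List.lookup "content" (pvSetContent d v) = some v := by
  induction d with
  | nil => simp [pvSetContent]
  | cons p t ih =>
    obtain ⟨k, x⟩ := p
    by_cases h : k = "content" <;> simp [pvSetContent, h, pv_lookup_cons, ih]

theorem pv_setContent_setContent (d : List (String × String)) (u v : String) :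
    pvSetContent (pvSetContent d u) v = pvSetContent d v := by
  induction d with
  | nil => simp [pvSetContent]
  | cons p t ih =>
    obtain ⟨k, x⟩ := p
    by_cases h : k = "content" <;> simp [pvSetContent, h, ih]

theorem pv_setContent_self (d : List (String × String)) (c : String)
    (h : List.lookup "content" d = some c) : pvSetContent d c = d := by
  induction d with
  | nil => simp [List.lookup] at h
  | cons p t ih =>
    obtain ⟨k, x⟩ := p
    rw [pv_lookup_cons] at h
    by_cases hk : k = "content"
    · simp [hk] at h; simp [pvSetContent, hk, h]
    · simp [hk] at h; simp [pvSetContent, hk, ih h]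

theorem pv_setContent_mk (r c v : String) : pvSetContent (pvMk r c) v = pvMk r v := by
  simp [pvMk, pvSetContent]

theorem pvBGroup_shape (r c : String) (l : List (String × String)) :
    ∃ c2 t2, pvBGroup r c l = (r, c2) :: t2 := by
  induction l generalizing c with
  | nil => exact ⟨c, [], rfl⟩
  | cons p t ih =>
    obtain ⟨r', c'⟩ := p
    by_cases h : r' = r
    · simpa [pvBGroup, h] using ih (c ++ "\n\n" ++ c')
    · exact ⟨c, pvBGroup r' c' t, by simp [pvBGroup, h]⟩

theorem pvBGroup_prepend (r : String) (l : List (String × String)) (p b c2 : String)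
    (t2 : List (String × String)) (h : pvBGroup r b l = (r, c2) :: t2) :
    pvBGroup r (p ++ "\n\n" ++ b) l = (r, p ++ "\n\n" ++ c2) :: t2 := by
  induction l generalizing b c2 t2 with
  | nil =>
    simp [pvBGroup] at h
    simp [pvBGroup, h.1, h.2]
  | cons q t ih =>
    obtain ⟨r', c'⟩ := q
    by_cases hr' : r' = r
    · rw [pvBGroup] at h ⊢
      simp only [hr'] at h ⊢
      rw [show (p ++ "\n\n" ++ b) ++ "\n\n" ++ c' = p ++ "\n\n" ++ (b ++ "\n\n" ++ c') by
        simp [String.append_assoc]]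
      exact ih _ _ _ h
    · rw [pvBGroup] at h ⊢
      simp only [hr'] at h ⊢
      obtain ⟨h1, h2⟩ := List.cons.injEq .. ▸ h
      simp_all

-- A's loop, started on a state ending in a fresh {"role": r, "content": c} dict, computes B's groups
theorem pvALoop_mk (l : List (List (String × String))) (pre : List (List (String × String)))
    (r c : String) :
    pvALoop (pre ++ [pvMk r c]) l =
      pre ++ (pvBGroup r c (l.map (fun m => (pvNormRole m, pvContent m)))).map (fun p => pvMk p.1 p.2) := by
  induction l generalizing pre r c with
  | nil => simp [pvALoop, pvBGroup]
  | cons m t ih =>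
    rw [pvALoop]
    simp only [List.getLast?_concat, List.map_cons, pvBGroup]
    by_cases hrm : pvNormRole m = r
    · have hlk : List.lookup "role" (pvMk r c) = some (pvNormRole m) := by
        simp [pvMk, hrm]
      have hcmk : pvContent (pvMk r c) = c := by
        simp [pvContent, pvMk, pv_lookup_cons]
      simp only [hlk, reduceIte, List.dropLast_concat, hcmk, pv_setContent_mk, hrm]
      exact ih pre r (c ++ "\n\n" ++ pvContent m)
    · have hlk : ¬ (List.lookup "role" (pvMk r c) = some (pvNormRole m)) := by
        simp [pvMk]; exact fun hh => hrm hh.symm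
      simp only [if_neg hlk, hrm]
      rw [show (pre ++ [pvMk r c]) ++ [pvMk (pvNormRole m) (pvContent m)] =
            (pre ++ [pvMk r c]) ++ [pvMk (pvNormRole m) (pvContent m)] from rfl,
          ih (pre ++ [pvMk r c]) (pvNormRole m) (pvContent m)]
      simp

-- A's loop, started on a state ending in the system dict d, folds the leading "system" run into d
theorem pvALoop_sys (l : List (List (String × String))) (pre : List (List (String × String)))
    (d : List (String × String)) (c : String)
    (hr : List.lookup "role" d = some "system") (hc : List.lookup "content" d = some c) :
    pvALoop (pre ++ [d]) l =
      pre ++ (match pvBGroup "system" c (l.map (fun m => (pvNormRole m, pvContent m))) with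
              | (_, c2) :: t2 => pvSetContent d c2 :: t2.map (fun p => pvMk p.1 p.2)
              | [] => [d]) := by
  induction l generalizing pre d c with
  | nil =>
    simp [pvALoop, pvBGroup, pv_setContent_self d c hc]
  | cons m t ih =>
    rw [pvALoop]
    simp only [List.getLast?_concat, List.map_cons, pvBGroup]
    have hcd : pvContent d = c := by simp [pvContent, hc]
    by_cases hrm : pvNormRole m = "system"
    · have hlk : List.lookup "role" d = some (pvNormRole m) := by rw [hr, hrm]
      simp only [hlk, reduceIte, List.dropLast_concat, hcd, hrm]
      have hr' : List.lookup "role" (pvSetContent d (c ++ "\n\n" ++ pvContent m)) = some "system" := by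
        rw [pv_lookup_role_setContent, hr]
      have hc' : List.lookup "content" (pvSetContent d (c ++ "\n\n" ++ pvContent m)) =
          some (c ++ "\n\n" ++ pvContent m) := pv_lookup_content_setContent d _
      rw [ih pre _ _ hr' hc']
      obtain ⟨c2, t2, hG⟩ := pvBGroup_shape "system" (c ++ "\n\n" ++ pvContent m)
        (t.map (fun m => (pvNormRole m, pvContent m)))
      rw [hG]
      simp [pv_setContent_setContent]
    · have hlk : ¬ (List.lookup "role" d = some (pvNormRole m)) := by
        rw [hr]; simp; exact fun hh => hrm hh.symm
      simp only [if_neg hlk, hrm]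
      rw [pvALoop_mk t (pre ++ [d]) (pvNormRole m) (pvContent m)]
      simp [pv_setContent_self d c hc]

theorem pvPop_eq (l : List (List (String × String))) : pvAPop l = pvBPop l := by
  induction l using pvAPop.induct with
  | case1 res last h hif ih =>
    rw [pvAPop.eq_def, pvBPop.eq_def]
    simp only [ih]
  | case2 res last h hif =>
    rw [pvAPop.eq_def, pvBPop.eq_def]
    split
    · rename_i l2 heq
      rw [heq] at h
      cases h
      simp only [if_neg hif]
    · rfl
  | case3 res h =>
    rw [pvAPop.eq_def, pvBPop.eq_def]
    split
    all_goals first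
      | rfl
      | (rename_i l2 heq; rw [heq] at h; cases h)

-- ===== VERDICT (by name: the statement is the Claim_ definition above) =====
theorem pvALoop_sys' (l : List (List (String × String))) (pre : List (List (String × String)))
    (d : List (String × String)) (c rr c2 : String) (t2 : List (String × String))
    (hr : List.lookup "role" d = some "system") (hc : List.lookup "content" d = some c)
    (hG : pvBGroup "system" c (l.map (fun m => (pvNormRole m, pvContent m))) = (rr, c2) :: t2) :
    pvALoop (pre ++ [d]) l = pre ++ pvSetContent d c2 :: t2.map (fun p => pvMk p.1 p.2) := by
  rw [pvALoop_sys l pre d c hr hc, hG]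

set_option maxHeartbeats 1600000 in
theorem fix_conversation_turn_order_spec : Claim_equal_fix_conversation_turn_order := by
  intro messages filler hdom hpre
  unfold Spec_fix_conversation_turn_order
  obtain ⟨hnodup, hkey⟩ := hpre
  cases messages with
  | nil => rfl
  | cons first restAll =>
    rw [fix_conversation_turn_order, fix_conversation_turn_order_alt]
    by_cases hsys : List.lookup "role" first = some "system"
    · -- leading system message
      simp only [hsys, reduceIte]
      cases restAll with
      | nil =>
        rw [show pvALoop [first] ([] : List (List (String × String))) = [first] from by
          simp [pvALoop], pvPop_eq]
        simp [pvBMerge]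
      | cons m t =>
        dsimp only
        obtain ⟨c2, t2, hG⟩ := pvBGroup_shape (pvNormRole m) (pvContent m)
          (t.map (fun m => (pvNormRole m, pvContent m)))
        by_cases hfr : pvNormRole m = "assistant"
        · have hnu : ¬ pvNormRole m = "user" := by rw [hfr]; decide
          have hns : ¬ pvNormRole m = "system" := by rw [hfr]; decide
          have hA : pvALoop (if pvNormRole m = "assistant" then [first] ++ [pvMk "user" filler]
              else [first]) (m :: t) =
              [first] ++ pvMk "user" filler ::
                (pvBGroup (pvNormRole m) (pvContent m)
                  (t.map (fun m => (pvNormRole m, pvContent m)))).map (fun p => pvMk p.1 p.2) := by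
            rw [if_pos hfr, pvALoop_mk, List.map_cons, pvBGroup, if_neg hnu]
            simp
          rw [hfr] at hG
          rw [hA, pvPop_eq]
          simp [pvBMerge, hG, hfr, show ¬ ("assistant" : String) = "system" from by decide]
        · cases hc0 : List.lookup "content" first with
          | some c0 =>
            have hcf : pvContent first = c0 := by simp [pvContent, hc0]
            by_cases hnm : pvNormRole m = "system"
            · have hG' : pvBGroup "system" (pvContent m)
                  (t.map (fun m => (pvNormRole m, pvContent m))) = ("system", c2) :: t2 := by
                rw [← hnm]; exact hG
              have hstep : pvBGroup "system" c0
                  ((m :: t).map (fun m => (pvNormRole m, pvContent m))) =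
                  ("system", c0 ++ "\n\n" ++ c2) :: t2 := by
                rw [List.map_cons, pvBGroup, if_pos hnm,
                  pvBGroup_prepend "system" (t.map (fun m => (pvNormRole m, pvContent m)))
                    c0 (pvContent m) c2 t2 hG']
              have hA : pvALoop (if pvNormRole m = "assistant" then [first] ++ [pvMk "user" filler]
                  else [first]) (m :: t) =
                  pvSetContent first (c0 ++ "\n\n" ++ c2) :: t2.map (fun p => pvMk p.1 p.2) := by
                rw [if_neg hfr]
                have h1 := pvALoop_sys' (m :: t) [] first c0 "system" (c0 ++ "\n\n" ++ c2) t2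
                  hsys hc0 hstep
                simpa using h1
              rw [hA, pvPop_eq]
              simp [pvBMerge, hG', hnm, hcf,
                show ¬ ("system" : String) = "assistant" from by decide]
            · have hstep : pvBGroup "system" c0
                  ((m :: t).map (fun m => (pvNormRole m, pvContent m))) =
                  ("system", c0) :: pvBGroup (pvNormRole m) (pvContent m)
                    (t.map (fun m => (pvNormRole m, pvContent m))) := by
                rw [List.map_cons, pvBGroup, if_neg hnm]
              have hA : pvALoop (if pvNormRole m = "assistant" then [first] ++ [pvMk "user" filler]
                  else [first]) (m :: t) =
                  first :: (pvBGroup (pvNormRole m) (pvContent m)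
                    (t.map (fun m => (pvNormRole m, pvContent m)))).map (fun p => pvMk p.1 p.2) := by
                rw [if_neg hfr]
                have h1 := pvALoop_sys' (m :: t) [] first c0 "system" c0
                  (pvBGroup (pvNormRole m) (pvContent m)
                    (t.map (fun m => (pvNormRole m, pvContent m)))) hsys hc0 hstep
                simpa [pv_setContent_self first c0 hc0] using h1
              rw [hA, pvPop_eq]
              simp [pvBMerge, hG, hnm, hfr]
          | none =>
            have hnm : ¬ pvNormRole m = "system" := by
              intro hnm
              exact hkey ⟨by simp, by simpa using hsys, by simpa using hc0, by simpa using hnm⟩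
            have hA : pvALoop (if pvNormRole m = "assistant" then [first] ++ [pvMk "user" filler]
                else [first]) (m :: t) =
                [first] ++ (pvBGroup (pvNormRole m) (pvContent m)
                  (t.map (fun m => (pvNormRole m, pvContent m)))).map (fun p => pvMk p.1 p.2) := by
              rw [if_neg hfr]
              have hlk : ¬ (List.lookup "role" first = some (pvNormRole m)) := by
                rw [hsys]
                simp
                exact fun hh => hnm hh.symm
              rw [pvALoop]
              simp only [List.getLast?_singleton]
              rw [if_neg hlk]
              exact pvALoop_mk t [first] (pvNormRole m) (pvContent m)
            rw [hA, pvPop_eq]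
            simp [pvBMerge, hG, hnm, hfr]
    · -- no system message
      simp only [hsys, reduceIte]
      obtain ⟨c2, t2, hG⟩ := pvBGroup_shape (pvNormRole first) (pvContent first)
        (restAll.map (fun m => (pvNormRole m, pvContent m)))
      by_cases hfr : pvNormRole first = "assistant"
      · rw [if_pos hfr]
        have hnu : ¬ pvNormRole first = "user" := by rw [hfr]; decide
        have hA : pvALoop ([] ++ [pvMk "user" filler]) (first :: restAll) =
            pvMk "user" filler ::
              (pvBGroup (pvNormRole first) (pvContent first)
                (restAll.map (fun m => (pvNormRole m, pvContent m)))).map (fun p => pvMk p.1 p.2) := by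
          rw [pvALoop_mk, List.map_cons, pvBGroup, if_neg hnu]
          simp
        rw [hfr] at hG
        rw [hA, pvPop_eq]
        simp [pvBMerge, hG, hfr]
      · rw [if_neg hfr]
        have hA : pvALoop [] (first :: restAll) =
            (pvBGroup (pvNormRole first) (pvContent first)
              (restAll.map (fun m => (pvNormRole m, pvContent m)))).map (fun p => pvMk p.1 p.2) := by
          rw [pvALoop]
          simp only [List.getLast?_nil]
          exact pvALoop_mk restAll [] (pvNormRole first) (pvContent first)
        rw [hA, pvPop_eq]
        simp [pvBMerge, hG, hfr]
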